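-- pv_equiv track=rewrite | github.com/lukewaltz/CPE-202_Projects | p1-lukewaltz/bears.py | bears
-- ===== SOURCE A (Python) =====
-- def bears(n):
--     giveOption = 0
--     try:  # accounts for non-int types with a throwaway variable
--         isInt = n // 2
--     except TypeError as TE:
--         return False
--     if n < 0:  # False if n is negative
--         return False
--     if n == 42:  # win condition
--         return True
--     if n % 5 == 0:  # n is divisible by 5
--         giveOption = 42
--         return bears(n - giveOption)  # recursive call
--     if n % 3 == 0 or n % 4 == 0:  # n is divisible by 3 or 4
--         int1 = n % 10  # takes last digit of n
--         int2 = (n % 100)//10  # takes second to last digit of n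
--         giveOption = int1 * int2
--         if giveOption != 0:
--             return bears(n - giveOption)  # recursive call
--     if n % 2 == 0:  # n is even
--         giveOption = n // 2
--         return bears(n - giveOption)  # recursive call
--     return False  # fail
-- ===== SOURCE B (Python) =====
-- def bears(n):
--     try:  # non-int types cannot be floor-divided: bail out once, up front
--         n // 2
--     except TypeError:
--         return False
--     while True:
--         if n < 0:
--             return False
--         if n == 42:
--             return True
--         if n % 5 == 0:
--             n -= 42
--             continue
--         if n % 3 == 0 or n % 4 == 0:
--             p = (n % 10) * ((n % 100) // 10)
--             if p:
--                 n -= p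
--                 continue
--         if n % 2 == 0:
--             n -= n // 2
--             continue
--         return False
-- ===== Notes on version B (the rewrite author's own statement) =====
-- stated objective: alternative
-- what changed: A's tail recursion is replaced by an iterative while-True loop that mutates n in place (the TypeError guard done once up front), with the same branch order and fall-through.
import Mathlib
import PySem

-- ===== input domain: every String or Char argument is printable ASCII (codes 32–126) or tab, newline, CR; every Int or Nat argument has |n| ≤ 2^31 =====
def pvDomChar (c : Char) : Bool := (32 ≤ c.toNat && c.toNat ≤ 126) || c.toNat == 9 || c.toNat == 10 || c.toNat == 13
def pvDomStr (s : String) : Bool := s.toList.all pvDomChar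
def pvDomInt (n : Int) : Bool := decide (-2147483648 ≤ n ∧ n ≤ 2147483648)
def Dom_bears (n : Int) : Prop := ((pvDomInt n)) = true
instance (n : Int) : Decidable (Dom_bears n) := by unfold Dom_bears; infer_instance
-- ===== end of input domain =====

-- B replaces A's tail recursion by an iterative while-True loop mutating n in place; same branch order and fall-through ('alternative' objective, same cost).
-- Both ports use a fuel counter of (n+42).toNat + 1 purely as a totality guard: the measure (n+42).toNat strictly
-- decreases at every recursive call / loop iteration, so the fuel is never exhausted on any input.

-- ===== PORT A =====
-- literal transliteration of A's recursion (the try/TypeError guard never fires for an Int argument)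
def bearsGo : Nat → Int → Bool
  | 0, _ => false
  | fuel + 1, n =>
    if n < 0 then false
    else if n = 42 then true
    else if PySem.Int.mod n 5 = 0 then bearsGo fuel (n - 42)
    else if PySem.Int.mod n 3 = 0 ∨ PySem.Int.mod n 4 = 0 then
      let int1 := PySem.Int.mod n 10
      let int2 := PySem.Int.floordiv (PySem.Int.mod n 100) 10
      let giveOption := int1 * int2
      if giveOption ≠ 0 then bearsGo fuel (n - giveOption)
      else if PySem.Int.mod n 2 = 0 then bearsGo fuel (n - PySem.Int.floordiv n 2) else false
    else if PySem.Int.mod n 2 = 0 then bearsGo fuel (n - PySem.Int.floordiv n 2) else false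

def bears (n : Int) : Bool := bearsGo ((n + 42).toNat + 1) n

-- ===== PORT B =====
-- one iteration of B's `while True:` body: `Sum.inl m` = "continue with n = m", `Sum.inr b` = "return b"
def bearsStep (n : Int) : Sum Int Bool :=
  if n < 0 then Sum.inr false
  else if n = 42 then Sum.inr true
  else if PySem.Int.mod n 5 = 0 then Sum.inl (n - 42)
  else if (PySem.Int.mod n 3 = 0 ∨ PySem.Int.mod n 4 = 0) ∧
          PySem.Int.mod n 10 * PySem.Int.floordiv (PySem.Int.mod n 100) 10 ≠ 0 then
    Sum.inl (n - PySem.Int.mod n 10 * PySem.Int.floordiv (PySem.Int.mod n 100) 10)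
  else if PySem.Int.mod n 2 = 0 then Sum.inl (n - PySem.Int.floordiv n 2)
  else Sum.inr false

-- the while loop: run bearsStep until it returns
def bearsLoop : Nat → Int → Bool
  | 0, _ => false
  | fuel + 1, n =>
    match bearsStep n with
    | Sum.inr b => b
    | Sum.inl m => bearsLoop fuel m

def bears_alt (n : Int) : Bool := bearsLoop ((n + 42).toNat + 1) n

-- ===== PRECONDITION & SPEC =====
def Spec_bears (n : Int) (out : Bool) : Prop := out = bears_alt n
instance (n : Int) (out : Bool) : Decidable (Spec_bears n out) := by unfold Spec_bears; infer_instance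

-- ===== CLAIM (what is proved, stated in full; the proofs are below) =====
def Claim_equal_bears : Prop := ∀ (n : Int), Dom_bears n → Spec_bears n (bears n)

-- ===== LEMMAS AND PROOFS =====
-- one unfolding of A's recursion equals one iteration of B's loop body (at the same fuel)
theorem bearsGo_step_eq (fuel : Nat) (n : Int) :
    bearsGo (fuel + 1) n =
      (match bearsStep n with | Sum.inr b => b | Sum.inl m => bearsGo fuel m) := by
  show (if n < 0 then false
    else if n = 42 then true
    else if PySem.Int.mod n 5 = 0 then bearsGo fuel (n - 42)
    else if PySem.Int.mod n 3 = 0 ∨ PySem.Int.mod n 4 = 0 then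
      let int1 := PySem.Int.mod n 10
      let int2 := PySem.Int.floordiv (PySem.Int.mod n 100) 10
      let giveOption := int1 * int2
      if giveOption ≠ 0 then bearsGo fuel (n - giveOption)
      else if PySem.Int.mod n 2 = 0 then bearsGo fuel (n - PySem.Int.floordiv n 2) else false
    else if PySem.Int.mod n 2 = 0 then bearsGo fuel (n - PySem.Int.floordiv n 2) else false) = _
  simp only [bearsStep]
  split_ifs <;> first | rfl | tauto

theorem bearsGo_eq_loop (fuel : Nat) (n : Int) : bearsGo fuel n = bearsLoop fuel n := by
  induction fuel generalizing n with
  | zero => rfl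
  | succ fuel ih =>
    rw [bearsGo_step_eq, bearsLoop]
    cases bearsStep n
    · exact ih _
    · rfl

-- ===== VERDICT (by name: the statement is the Claim_ definition above) =====
theorem bears_spec : Claim_equal_bears := by
  intro n _
  unfold Spec_bears bears bears_alt
  exact bearsGo_eq_loop _ n
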